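-- pv_equiv track=rewrite | github.com/ThomasbSAX/Quantix-Plateform | modules/converter/csv2tsv.py | _make_unique
-- ===== SOURCE A (Python) =====
-- def _make_unique(names: list[str]) -> list[str]:
--     seen: dict[str, int] = {}
--     out: list[str] = []
--     for name in names:
--         base = name.strip() or "field"
--         if base in seen:
--             seen[base] += 1
--             out.append(f"{base}_{seen[base]}")
--         else:
--             seen[base] = 0
--             out.append(base)
--     return out
-- ===== SOURCE B (Python) =====
-- def _make_unique(names: list[str]) -> list[str]:
--     bases = [name.strip() or "field" for name in names]
--     positions: dict[str, list[int]] = {}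
--     for i, b in enumerate(bases):
--         positions.setdefault(b, []).append(i)
--     out = [""] * len(bases)
--     for b, idxs in positions.items():
--         for j, i in enumerate(idxs):
--             out[i] = b if j == 0 else f"{b}_{j}"
--     return out
-- ===== Notes on version B (the rewrite author's own statement) =====
-- stated objective: alternative
-- what changed: Replaces A's single running-counter scan with a two-phase build: first a grouping index mapping each base to its ordered list of positions, then a scatter pass writing base / base_j into a preallocated output per group.
import Mathlib
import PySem

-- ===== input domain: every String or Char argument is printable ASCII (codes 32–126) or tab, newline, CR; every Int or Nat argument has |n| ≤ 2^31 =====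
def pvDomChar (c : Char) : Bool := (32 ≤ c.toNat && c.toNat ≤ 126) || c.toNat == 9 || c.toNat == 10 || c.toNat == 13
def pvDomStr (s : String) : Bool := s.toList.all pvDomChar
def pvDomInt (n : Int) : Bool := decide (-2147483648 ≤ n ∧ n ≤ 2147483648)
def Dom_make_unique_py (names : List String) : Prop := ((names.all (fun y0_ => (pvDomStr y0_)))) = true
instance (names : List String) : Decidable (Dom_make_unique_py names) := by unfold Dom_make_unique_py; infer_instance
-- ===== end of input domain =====

-- B replaces A's running seen-dict scan with a two-phase grouping index (base -> positions) plus a scatter pass; same results.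


-- shared helper: `name.strip() or "field"` (Python `or` on strings = empty test)
def pvBase (name : String) : String :=
  let b := PySem.Str.strip name
  if b = "" then "field" else b

-- ===== PORT A =====
-- A's loop: a running dict `seen` mapping base → last suffix used, output appended per element.
def make_unique_py (names : List String) : List String :=
  (names.foldl
    (fun (st : PySem.Dict String Int × List String) name =>
      let seen := st.1
      let out := st.2
      let base := pvBase name
      match seen.get? base with
      | some v => (seen.insert base (v + 1), out ++ [base ++ "_" ++ PySem.Int.toStr (v + 1)])
      | none => (seen.insert base 0, out ++ [base]))
    (PySem.Dict.empty, [])).2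

-- ===== PORT B =====
-- B: build a grouping index `positions` (base → ordered list of indices; `setdefault(b, []).append(i)`
--    is `modify b [] (· ++ [i])`), then scatter base / base_j into a preallocated output list.
--    Python `out[i] = v`: here `i` is always a non-negative in-range index, so `List.set` is exact.
def make_unique_py_alt (names : List String) : List String :=
  let bases := names.map pvBase
  let positions := (PySem.List.enumerate bases).foldl
    (fun (d : PySem.Dict String (List Int)) p => d.modify p.2 [] (· ++ [p.1]))
    PySem.Dict.empty
  let out0 := List.replicate bases.length ""
  positions.items.foldl
    (fun out bi =>
      (PySem.List.enumerate bi.2).foldl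
        (fun out ji =>
          out.set ji.2.toNat (if ji.1 = 0 then bi.1 else bi.1 ++ "_" ++ PySem.Int.toStr ji.1))
        out)
    out0

-- ===== PRECONDITION & SPEC =====
def Spec_make_unique_py (names : List String) (out : List String) : Prop := out = make_unique_py_alt names
instance (names : List String) (out : List String) : Decidable (Spec_make_unique_py names out) := by unfold Spec_make_unique_py; infer_instance

-- ===== CLAIM (what is proved, stated in full; the proofs are below) =====
def Claim_equal_make_unique_py : Prop := ∀ (names : List String), Dom_make_unique_py names → Spec_make_unique_py names (make_unique_py names)

-- ===== LEMMAS AND PROOFS =====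

-- the common specification: process bases left to right, given the list `p` of bases already seen
def pvSpecGo (p bs : List String) : List String :=
  match bs with
  | [] => []
  | b :: rs =>
    (if p.count b = 0 then b else b ++ "_" ++ PySem.Int.toStr (p.count b)) :: pvSpecGo (p ++ [b]) rs

-- A's fold, relative to an invariant relating `seen` to the multiset of already-processed bases `p`
lemma pvA_fold (rest : List String) :
    ∀ (p : List String) (seen : PySem.Dict String Int) (out : List String),
    (∀ b, seen.get? b = if p.count b = 0 then none else some ((p.count b : Int) - 1)) →
    (rest.foldl
      (fun (st : PySem.Dict String Int × List String) name =>
        let seen := st.1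
        let out := st.2
        let base := pvBase name
        match seen.get? base with
        | some v => (seen.insert base (v + 1), out ++ [base ++ "_" ++ PySem.Int.toStr (v + 1)])
        | none => (seen.insert base 0, out ++ [base]))
      (seen, out)).2 = out ++ pvSpecGo p (rest.map pvBase) := by
  induction rest with
  | nil => intro p seen out h; simp [pvSpecGo]
  | cons n rs ih =>
    intro p seen out h
    simp only [List.foldl_cons, List.map_cons, pvSpecGo]
    by_cases hc : p.count (pvBase n) = 0
    · rw [show seen.get? (pvBase n) = none by rw [h]; simp [hc]]
      simp only [hc, if_pos]
      rw [ih (p ++ [pvBase n])]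
      · simp
      · intro b
        rw [PySem.Dict.get?_insert]
        by_cases hb : b = pvBase n
        · subst hb
          have h1 : (p ++ [pvBase n]).count (pvBase n) = 1 := by simp [hc]
          rw [if_pos rfl, h1]
          norm_num
        · rw [if_neg hb, h b]
          have h2 : (p ++ [pvBase n]).count b = p.count b := by
            simp [List.count_append, Ne.symm hb]
          rw [h2]
    · rw [show seen.get? (pvBase n) = some ((p.count (pvBase n) : Int) - 1) by rw [h]; simp [hc]]
      simp only [if_neg hc]
      rw [ih (p ++ [pvBase n])]
      · have : ((p.count (pvBase n) : Int) - 1 + 1) = (p.count (pvBase n) : Int) := by ring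
        simp [this]
      · intro b
        rw [PySem.Dict.get?_insert]
        by_cases hb : b = pvBase n
        · subst hb
          have h1 : (p ++ [pvBase n]).count (pvBase n) = p.count (pvBase n) + 1 := by simp
          rw [if_pos rfl, h1, if_neg (by omega)]
          congr 1
          push_cast
          ring
        · rw [if_neg hb, h b]
          have h2 : (p ++ [pvBase n]).count b = p.count b := by
            simp [List.count_append, Ne.symm hb]
          rw [h2]

-- length and per-index characterisation of pvSpecGo
lemma pvSpecGo_length (bs : List String) : ∀ p : List String, (pvSpecGo p bs).length = bs.length := by
  induction bs with
  | nil => intro p; simp [pvSpecGo]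
  | cons b rs ih => intro p; simp [pvSpecGo, ih]

lemma pvSpecGo_getElem (bs : List String) : ∀ (p : List String) (k : Nat) (hk : k < bs.length),
    (pvSpecGo p bs)[k]'(by rw [pvSpecGo_length]; exact hk) =
      (if ((p ++ bs.take k).count bs[k] : Int) = 0 then bs[k]
       else bs[k] ++ "_" ++ PySem.Int.toStr ((p ++ bs.take k).count bs[k] : Int)) := by
  induction bs with
  | nil => intro p k hk; simp at hk
  | cons b rs ih =>
    intro p k hk
    match k with
    | 0 => simp [pvSpecGo]
    | k' + 1 =>
      have hk' : k' < rs.length := by simpa using hk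
      have := ih (p ++ [b]) k' hk'
      simp only [pvSpecGo]
      rw [List.getElem_cons_succ, this]
      simp [List.append_assoc]

-- the grouping fold returns, for each key, the indices carrying that key, in order
lemma pv_grp_getD (l : List (Int × String)) : ∀ (d : PySem.Dict String (List Int)) (c : String),
    (l.foldl (fun d p => d.modify p.2 [] (· ++ [p.1])) d).getD c []
      = d.getD c [] ++ (l.filter (fun p => p.2 == c)).map (·.1) := by
  induction l with
  | nil => intro d c; simp
  | cons p l ih =>
    intro d c
    simp only [List.foldl_cons, List.filter_cons]
    rw [ih]
    by_cases h : p.2 = c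
    · subst h; simp [List.append_assoc]
    · have hb : (p.2 == c) = false := by simp [h]
      simp [hb, PySem.Dict.getD_modify, Ne.symm h]

-- the position list of base b
def pvIdx (bs : List String) (b : String) : List Int :=
  ((PySem.List.enumerate bs).filter (fun p => p.2 == b)).map (·.1)

lemma pvIdx_append (bs : List String) (x b : String) :
    pvIdx (bs ++ [x]) b = pvIdx bs b ++ (if x = b then [((bs.length : Int))] else []) := by
  unfold pvIdx
  rw [show PySem.List.enumerate (bs ++ [x]) 0
        = PySem.List.enumerate bs 0 ++ [(((bs.length : Nat) : Int), x)] by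
      rw [PySem.List.enumerate_append]
      simp [PySem.List.enumerate_cons, PySem.List.enumerate_nil]]
  rw [List.filter_append, List.map_append]
  by_cases h : x = b <;> simp [h]

-- the j-th position of base b is an index k with bs[k] = b whose prefix holds exactly j copies of b
lemma pvIdx_spec (bs : List String) (b : String) :
    (pvIdx bs b).length = bs.count b ∧
    ∀ j, j < (pvIdx bs b).length → ∃ k : Nat, k < bs.length ∧
      (pvIdx bs b)[j]? = some ((k : Nat) : Int) ∧ bs[k]? = some b ∧ (bs.take k).count b = j := by
  induction bs using List.reverseRecOn with
  | nil =>
    constructor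
    · simp [pvIdx, PySem.List.enumerate_nil]
    · intro j hj; simp [pvIdx, PySem.List.enumerate_nil] at hj
  | append_singleton bs x ih =>
    obtain ⟨ihlen, ihspec⟩ := ih
    constructor
    · rw [pvIdx_append]
      by_cases h : x = b
      · simp [h, ihlen, List.count_append]
      · simp [h, ihlen, List.count_append]
    · intro j hj
      rw [pvIdx_append] at hj ⊢
      by_cases h : x = b
      · rw [if_pos h] at hj ⊢
        by_cases hlt : j < (pvIdx bs b).length
        · obtain ⟨k, hk, h1, h2, h3⟩ := ihspec j hlt
          refine ⟨k, by simp; omega, ?_, ?_, ?_⟩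
          · rw [List.getElem?_append_left hlt]; exact h1
          · rw [List.getElem?_append_left hk]; exact h2
          · rw [List.take_append_of_le_length (le_of_lt hk)]; exact h3
        · have hlen2 : (pvIdx bs b ++ [((bs.length : Nat) : Int)]).length = (pvIdx bs b).length + 1 := by simp
          have hj2 : j = (pvIdx bs b).length := by rw [hlen2] at hj; omega
          refine ⟨bs.length, by simp, ?_, ?_, ?_⟩
          · rw [hj2]; simp
          · rw [← h]; simp
          · rw [List.take_append_of_le_length (le_refl _), List.take_length, ← ihlen, hj2]
      · rw [if_neg h] at hj ⊢
        simp only [List.append_nil] at hj ⊢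
        obtain ⟨k, hk, h1, h2, h3⟩ := ihspec j hj
        refine ⟨k, by simp; omega, h1, ?_, ?_⟩
        · rw [List.getElem?_append_left hk]; exact h2
        · rw [List.take_append_of_le_length (le_of_lt hk)]; exact h3

-- prefix counts are strictly monotone across an occurrence
lemma pv_count_mono (bs : List String) (b : String) (k pos : Nat) (h : k < pos)
    (hk : k < bs.length) (hkb : bs[k]'hk = b) :
    (bs.take k).count b < (bs.take pos).count b := by
  have h1 : (bs.take pos).take (k + 1) = bs.take (k + 1) := by
    rw [List.take_take]; congr 1; omega
  have h2 : bs.take (k + 1) <+: bs.take pos := h1 ▸ List.take_prefix (k + 1) (bs.take pos)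
  have h3 := h2.sublist.count_le b
  have h4 : bs.take (k + 1) = bs.take k ++ [b] := by
    rw [List.take_add_one]; simp [List.getElem?_eq_getElem hk, hkb]
  rw [h4, List.count_append] at h3
  simp at h3
  omega

-- an occurrence of b is determined by its prefix count
lemma pv_pos_unique (bs : List String) (b : String) (k pos : Nat) (hk : k < bs.length)
    (hpos : pos < bs.length) (hbk : bs[k]'hk = b) (hbp : bs[pos]'hpos = b)
    (hc : (bs.take k).count b = (bs.take pos).count b) : k = pos := by
  by_contra hne
  rcases Nat.lt_or_ge k pos with hlt | hge
  · have := pv_count_mono bs b k pos hlt hk hbk; omega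
  · have hlt : pos < k := by omega
    have := pv_count_mono bs b pos k hlt hpos hbp; omega

-- scatter-fold machinery
lemma pv_len_foldl_set (U : List (Nat × String)) : ∀ init : List String,
    (U.foldl (fun o q => o.set q.1 q.2) init).length = init.length := by
  induction U with
  | nil => intro init; simp
  | cons u U ih => intro init; simp [ih, List.length_set]

lemma pv_get_foldl_set_notmem (U : List (Nat × String)) : ∀ (init : List String) (pos : Nat),
    pos ∉ U.map (·.1) →
    (U.foldl (fun o q => o.set q.1 q.2) init)[pos]? = init[pos]? := by
  induction U with
  | nil => intro init pos _; simp
  | cons u U ih =>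
    intro init pos h
    simp only [List.map_cons, List.mem_cons, not_or] at h
    simp only [List.foldl_cons]
    rw [ih _ pos h.2, List.getElem?_set_ne (Ne.symm h.1)]

lemma pv_get_foldl_set_mem (U : List (Nat × String)) : ∀ (init : List String) (pos : Nat) (v : String),
    (pos, v) ∈ U → (∀ q ∈ U, q.1 = pos → q.2 = v) → pos < init.length →
    (U.foldl (fun o q => o.set q.1 q.2) init)[pos]? = some v := by
  induction U with
  | nil => intro _ _ _ h; simp at h
  | cons u U ih =>
    intro init pos v hmem huniq hlen
    simp only [List.foldl_cons]
    by_cases hx : ∃ q ∈ U, q.1 = pos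
    · obtain ⟨q, hq, hq1⟩ := hx
      have hv : q.2 = v := huniq q (List.mem_cons_of_mem _ hq) hq1
      have hmem' : (pos, v) ∈ U := by
        have : q = (pos, v) := by
          obtain ⟨q1, q2⟩ := q
          simp only at hq1 hv
          rw [hq1, hv]
        rwa [this] at hq
      exact ih _ pos v hmem' (fun q hq' h' => huniq q (List.mem_cons_of_mem _ hq') h')
        (by rw [List.length_set]; exact hlen)
    · have hnot : pos ∉ U.map (·.1) := by
        intro hmm
        obtain ⟨q, hq, hq1⟩ := List.mem_map.mp hmm
        exact hx ⟨q, hq, hq1⟩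
      have hu : u = (pos, v) := by
        rcases List.mem_cons.mp hmem with h | h
        · exact h.symm
        · exact absurd ⟨_, h, rfl⟩ hx
      rw [pv_get_foldl_set_notmem U _ pos hnot, hu, List.getElem?_set_self hlen]

-- a nested per-group scatter loop is one flat scatter over the flattened update pairs
lemma pv_foldl_foldl (v : Int → String → String) (l : List (String × List Int)) :
    ∀ init : List String,
    l.foldl (fun out bi =>
        (PySem.List.enumerate bi.2).foldl (fun out ji => out.set ji.2.toNat (v ji.1 bi.1)) out) init
    = (l.flatMap (fun bi =>
        (PySem.List.enumerate bi.2).map (fun ji => (ji.2.toNat, v ji.1 bi.1)))).foldl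
        (fun o q => o.set q.1 q.2) init := by
  induction l with
  | nil => intro init; simp
  | cons bi l ih =>
    intro init
    simp only [List.foldl_cons, List.flatMap_cons, List.foldl_append]
    rw [ih, List.foldl_map]

-- B's whole computation, for an arbitrary base list
lemma pvAlt_core (bs : List String) :
    (((PySem.List.enumerate bs).foldl
        (fun (d : PySem.Dict String (List Int)) p => d.modify p.2 [] (· ++ [p.1]))
        PySem.Dict.empty).items.foldl
      (fun out bi =>
        (PySem.List.enumerate bi.2).foldl
          (fun out ji =>
            out.set ji.2.toNat (if ji.1 = 0 then bi.1 else bi.1 ++ "_" ++ PySem.Int.toStr ji.1))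
          out)
      (List.replicate bs.length "")) = pvSpecGo [] bs := by
  have hkeys : ((PySem.List.enumerate bs).foldl
      (fun (d : PySem.Dict String (List Int)) p => d.modify p.2 [] (· ++ [p.1]))
      PySem.Dict.empty).keys = PySem.Set.ofList bs := by
    rw [PySem.Dict.keys_foldl_modify_key (PySem.List.enumerate bs) (·.2) [] (fun _ p => (· ++ [p.1])) PySem.Dict.empty]
    rw [PySem.Dict.keys_empty, PySem.List.map_snd_enumerate, PySem.Set.update_nil_left]
  have hnodup : ((PySem.List.enumerate bs).foldl
      (fun (d : PySem.Dict String (List Int)) p => d.modify p.2 [] (· ++ [p.1]))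
      PySem.Dict.empty).keys.Nodup :=
    PySem.Dict.nodup_keys_foldl_modify_key (PySem.List.enumerate bs) (·.2) [] (fun _ p => (· ++ [p.1]))
      PySem.Dict.empty (by rw [PySem.Dict.keys_empty]; exact List.nodup_nil)
  have hgetD : ∀ c, ((PySem.List.enumerate bs).foldl
      (fun (d : PySem.Dict String (List Int)) p => d.modify p.2 [] (· ++ [p.1]))
      PySem.Dict.empty).getD c [] = pvIdx bs c := by
    intro c
    rw [pv_grp_getD]
    simp [pvIdx, PySem.Dict.getD_empty]
  have hitems : ((PySem.List.enumerate bs).foldl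
      (fun (d : PySem.Dict String (List Int)) p => d.modify p.2 [] (· ++ [p.1]))
      PySem.Dict.empty).items = (PySem.Set.ofList bs).map (fun b => (b, pvIdx bs b)) := by
    rw [PySem.Dict.items_eq_map_keys _ hnodup [], hkeys]
    exact List.map_congr_left (fun b _ => by rw [hgetD])
  rw [hitems]
  rw [pv_foldl_foldl (fun j b => if j = 0 then b else b ++ "_" ++ PySem.Int.toStr j)]
  apply List.ext_getElem
  · rw [pv_len_foldl_set, List.length_replicate, pvSpecGo_length]
  · intro pos h1 h2
    have hpos : pos < bs.length := by rw [pv_len_foldl_set, List.length_replicate] at h1; exact h1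
    have hbmem : bs[pos]'hpos ∈ bs := List.getElem_mem hpos
    -- the prefix count of the base at pos
    obtain ⟨hlenI, hspecI⟩ := pvIdx_spec bs (bs[pos]'hpos)
    have hcnt : (bs.take pos).count (bs[pos]'hpos) < bs.count (bs[pos]'hpos) := by
      have h4 : bs.take (pos + 1) = bs.take pos ++ [bs[pos]'hpos] := by
        rw [List.take_add_one]; simp [List.getElem?_eq_getElem hpos]
      have h5 := (List.take_prefix (pos + 1) bs).sublist.count_le (bs[pos]'hpos)
      rw [h4, List.count_append] at h5
      simp at h5
      omega
    have hj0 : (bs.take pos).count (bs[pos]'hpos) < (pvIdx bs (bs[pos]'hpos)).length := by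
      rw [hlenI]; exact hcnt
    obtain ⟨k, hk, hIk, hbk, hck⟩ := hspecI ((bs.take pos).count (bs[pos]'hpos)) hj0
    have hbk' : bs[k]'hk = bs[pos]'hpos := by
      have h := List.getElem?_eq_getElem hk (l := bs)
      rw [hbk] at h
      exact (Option.some_inj.mp h).symm
    have hkpos : k = pos := pv_pos_unique bs (bs[pos]'hpos) k pos hk hpos hbk' rfl hck
    rw [hkpos] at hIk
    have hIk' : (pvIdx bs (bs[pos]'hpos))[(bs.take pos).count (bs[pos]'hpos)]'hj0 = ((pos : Nat) : Int) := by
      have h := List.getElem?_eq_getElem hj0 (l := pvIdx bs (bs[pos]'hpos))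
      rw [hIk] at h
      exact (Option.some_inj.mp h).symm
    -- the unique update value at pos
    have hmem : (pos, (if (((bs.take pos).count (bs[pos]'hpos) : Nat) : Int) = 0 then bs[pos]'hpos
        else bs[pos]'hpos ++ "_" ++ PySem.Int.toStr (((bs.take pos).count (bs[pos]'hpos) : Nat) : Int))) ∈
        ((PySem.Set.ofList bs).map (fun b => (b, pvIdx bs b))).flatMap (fun bi =>
          (PySem.List.enumerate bi.2).map (fun ji =>
            (ji.2.toNat, if ji.1 = 0 then bi.1 else bi.1 ++ "_" ++ PySem.Int.toStr ji.1))) := by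
      apply List.mem_flatMap.mpr
      refine ⟨(bs[pos]'hpos, pvIdx bs (bs[pos]'hpos)),
        List.mem_map.mpr ⟨bs[pos]'hpos, (PySem.Set.mem_ofList _ _).mpr hbmem, rfl⟩, ?_⟩
      apply List.mem_map.mpr
      refine ⟨((((bs.take pos).count (bs[pos]'hpos) : Nat) : Int),
        (pvIdx bs (bs[pos]'hpos))[(bs.take pos).count (bs[pos]'hpos)]'hj0), ?_, ?_⟩
      · exact (PySem.List.mem_enumerate_iff _ _ _).mpr ⟨(bs.take pos).count (bs[pos]'hpos), hj0, by simp⟩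
      · rw [hIk']; simp
    have huniq : ∀ q ∈ ((PySem.Set.ofList bs).map (fun b => (b, pvIdx bs b))).flatMap (fun bi =>
          (PySem.List.enumerate bi.2).map (fun ji =>
            (ji.2.toNat, if ji.1 = 0 then bi.1 else bi.1 ++ "_" ++ PySem.Int.toStr ji.1))),
        q.1 = pos → q.2 = (if (((bs.take pos).count (bs[pos]'hpos) : Nat) : Int) = 0 then bs[pos]'hpos
          else bs[pos]'hpos ++ "_" ++ PySem.Int.toStr (((bs.take pos).count (bs[pos]'hpos) : Nat) : Int)) := by
      intro q hq hq1
      obtain ⟨bi, hbi, hq2⟩ := List.mem_flatMap.mp hq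
      obtain ⟨b, _, hbieq⟩ := List.mem_map.mp hbi
      obtain ⟨ji, hji, hqeq⟩ := List.mem_map.mp hq2
      obtain ⟨j', hj', hjieq⟩ := (PySem.List.mem_enumerate_iff _ _ _).mp hji
      obtain ⟨hlenb, hspecb⟩ := pvIdx_spec bs b
      subst hbieq
      obtain ⟨k', hk', hIk2, hbk2, hck2⟩ := hspecb j' (by simpa using hj')
      have hIk2' : (pvIdx bs b)[j']'(by simpa using hj') = ((k' : Nat) : Int) := by
        have h := List.getElem?_eq_getElem (by simpa using hj' : j' < (pvIdx bs b).length) (l := pvIdx bs b)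
        rw [hIk2] at h
        exact (Option.some_inj.mp h).symm
      subst hjieq
      subst hqeq
      simp only [zero_add] at hq1 ⊢
      have hk'pos : k' = pos := by
        rw [hIk2'] at hq1
        simpa using hq1
      subst k'
      have hbpos : b = bs[pos]'hpos := by
        have h := List.getElem?_eq_getElem hk' (l := bs)
        rw [hbk2] at h
        exact Option.some_inj.mp h
      have hj'eq : j' = (bs.take pos).count (bs[pos]'hpos) := by
        rw [← hck2, hbpos]
      rw [hbpos, hj'eq]
    have hfin := pv_get_foldl_set_mem _ (List.replicate bs.length "") pos _ hmem huniq
      (by rw [List.length_replicate]; exact hpos)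
    have hsome := List.getElem?_eq_getElem h1
    rw [hfin] at hsome
    rw [pvSpecGo_getElem bs [] pos hpos]
    simp only [List.nil_append]
    exact (Option.some_inj.mp hsome).symm

-- B's port equals the common specification
lemma pvAlt_eq (names : List String) :
    make_unique_py_alt names = pvSpecGo [] (names.map pvBase) := by
  unfold make_unique_py_alt
  exact pvAlt_core (names.map pvBase)

-- ===== VERDICT (by name: the statement is the Claim_ definition above) =====
theorem make_unique_py_spec : Claim_equal_make_unique_py := by
  intro names _
  unfold Spec_make_unique_py make_unique_py
  rw [pvA_fold names [] PySem.Dict.empty [] (by intro b; simp [PySem.Dict.get?_empty]), pvAlt_eq]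
  simp
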